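-- pv_equiv track=rewrite | github.com/carlosdanielpohlod/TCC-ML-in-ecommerce-and-node-ecommerce-system | recomender/utils.py | getRatingsUsuarioComumComVizinhos
-- ===== SOURCE A (Python) =====
-- def getRatingsUsuarioComumComVizinhos(ratings_user, rating_vizinhos):
--
--   qtd_vizinhos = len(rating_vizinhos)
--   ratings_comum_usuario_e_vizinhos = []
--   qtd_produtos = len(ratings_user)
--
--   for produto_index in range(qtd_produtos):
--     todos_os_vizinhos_tambem_avaliaram = True
--
--     if(ratings_user[produto_index] != 0 ):
--
--       for vizinho_index in range(qtd_vizinhos):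
--         if(rating_vizinhos[vizinho_index][produto_index] == 0 ):
--           todos_os_vizinhos_tambem_avaliaram = False
--
--       if(todos_os_vizinhos_tambem_avaliaram):
--         ratings_comum_usuario_e_vizinhos.append(ratings_user[produto_index])
--
--   return ratings_comum_usuario_e_vizinhos
-- ===== SOURCE B (Python) =====
-- def getRatingsUsuarioComumComVizinhos(ratings_user, rating_vizinhos):
--     # shrinking index set: start from the user's rated indices, intersect per neighbor
--     idxs = [i for i in range(len(ratings_user)) if ratings_user[i] != 0]
--     for vizinho in rating_vizinhos:
--         idxs = [i for i in idxs if vizinho[i] != 0]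
--     return [ratings_user[i] for i in idxs]
-- ===== Notes on version B (the rewrite author's own statement) =====
-- stated objective: simpler
-- what changed: Replaces the per-product boolean flag with nested index loops by a shrinking set of rated indices that each neighbor row filters once, followed by a final map back to ratings.
import Mathlib
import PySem

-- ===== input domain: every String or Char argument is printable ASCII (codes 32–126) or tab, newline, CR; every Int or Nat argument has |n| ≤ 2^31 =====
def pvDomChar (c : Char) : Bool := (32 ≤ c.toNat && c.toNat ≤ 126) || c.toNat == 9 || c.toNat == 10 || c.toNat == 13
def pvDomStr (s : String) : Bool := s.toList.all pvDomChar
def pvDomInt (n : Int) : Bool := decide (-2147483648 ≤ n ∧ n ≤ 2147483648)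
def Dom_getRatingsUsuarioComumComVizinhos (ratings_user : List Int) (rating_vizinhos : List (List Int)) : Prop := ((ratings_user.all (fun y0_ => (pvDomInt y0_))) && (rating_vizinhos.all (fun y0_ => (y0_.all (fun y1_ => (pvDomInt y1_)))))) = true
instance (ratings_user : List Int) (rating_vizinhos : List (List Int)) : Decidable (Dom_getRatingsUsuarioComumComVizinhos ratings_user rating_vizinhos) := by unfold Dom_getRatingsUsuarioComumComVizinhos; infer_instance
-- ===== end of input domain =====

-- B replaces A's per-product boolean flag (with its inner neighbor-index loop) by a shrinking
-- list of rated indices that each neighbor row filters once; objective: simpler.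

-- ===== PORT A =====
-- literal transliteration: outer loop over product indices, inner flag loop over neighbor indices
def getRatingsUsuarioComumComVizinhos (ratings_user : List Int) (rating_vizinhos : List (List Int)) : List Int :=
  let qtd_vizinhos := rating_vizinhos.length
  let qtd_produtos := ratings_user.length
  (List.range qtd_produtos).foldl (fun acc produto_index =>
    if ratings_user.getD produto_index 0 ≠ 0 then
      let todos_os_vizinhos_tambem_avaliaram :=
        (List.range qtd_vizinhos).foldl (fun b vizinho_index =>
          if (rating_vizinhos.getD vizinho_index []).getD produto_index 0 = 0 then false else b) true
      if todos_os_vizinhos_tambem_avaliaram then acc ++ [ratings_user.getD produto_index 0] else acc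
    else acc) []

-- ===== PORT B =====
def getRatingsUsuarioComumComVizinhos_alt (ratings_user : List Int) (rating_vizinhos : List (List Int)) : List Int :=
  let idxs := (List.range ratings_user.length).filter (fun i => ratings_user.getD i 0 ≠ 0)
  let surv := rating_vizinhos.foldl (fun idxs vizinho => idxs.filter (fun i => vizinho.getD i 0 ≠ 0)) idxs
  surv.map (fun i => ratings_user.getD i 0)

-- ===== PRECONDITION & SPEC =====
-- Pre_ excludes exactly the ragged inputs where the Python A raises IndexError: some neighbor
-- row is shorter than a product index the user actually rated.
def Pre_getRatingsUsuarioComumComVizinhos (ratings_user : List Int) (rating_vizinhos : List (List Int)) : Prop :=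
  ∀ i ∈ List.range ratings_user.length, ratings_user.getD i 0 ≠ 0 →
    ∀ row ∈ rating_vizinhos, i < row.length
instance (ratings_user : List Int) (rating_vizinhos : List (List Int)) : Decidable (Pre_getRatingsUsuarioComumComVizinhos ratings_user rating_vizinhos) := by unfold Pre_getRatingsUsuarioComumComVizinhos; infer_instance

def pvWitness_getRatingsUsuarioComumComVizinhos : List Int × List (List Int) := ([2, 0, 3], [[1, 0, 4], [5, 6, 7]])

def Spec_getRatingsUsuarioComumComVizinhos (ratings_user : List Int) (rating_vizinhos : List (List Int)) (out : List Int) : Prop := out = getRatingsUsuarioComumComVizinhos_alt ratings_user rating_vizinhos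
instance (ratings_user : List Int) (rating_vizinhos : List (List Int)) (out : List Int) : Decidable (Spec_getRatingsUsuarioComumComVizinhos ratings_user rating_vizinhos out) := by unfold Spec_getRatingsUsuarioComumComVizinhos; infer_instance

-- ===== CLAIM (what is proved, stated in full; the proofs are below) =====
def Claim_equal_getRatingsUsuarioComumComVizinhos : Prop := ∀ (ratings_user : List Int) (rating_vizinhos : List (List Int)), Dom_getRatingsUsuarioComumComVizinhos ratings_user rating_vizinhos → Pre_getRatingsUsuarioComumComVizinhos ratings_user rating_vizinhos → Spec_getRatingsUsuarioComumComVizinhos ratings_user rating_vizinhos (getRatingsUsuarioComumComVizinhos ratings_user rating_vizinhos)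

-- ===== LEMMAS AND PROOFS =====

-- A's inner flag loop over neighbor indices computes "every row is nonzero at i".
lemma inner_flag (rv : List (List Int)) (i : Nat) (b : Bool) :
    (List.range rv.length).foldl (fun b v => if (rv.getD v []).getD i 0 = 0 then false else b) b
      = (b && rv.all (fun row => decide (row.getD i 0 ≠ 0))) := by
  induction rv generalizing b with
  | nil => simp
  | cons r rs ih =>
      rw [List.length_cons, List.range_succ_eq_map]
      simp only [List.foldl_cons, List.foldl_map, List.getD_cons_succ, List.getD_cons_zero]
      rw [ih]
      cases b <;> simp

-- B's neighbor fold filters by "every row is nonzero at i" in one pass.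
lemma fold_filter (rv : List (List Int)) (idxs : List Nat) :
    rv.foldl (fun idxs row => idxs.filter (fun i => row.getD i 0 ≠ 0)) idxs
      = idxs.filter (fun i => rv.all (fun row => decide (row.getD i 0 ≠ 0))) := by
  induction rv generalizing idxs with
  | nil => simp
  | cons r rs ih =>
      rw [List.foldl_cons, ih, List.filter_filter]
      refine List.filter_congr fun a _ => ?_
      simp [Bool.and_comm]

-- ===== VERDICT (by name: the statement is the Claim_ definition above) =====
theorem getRatingsUsuarioComumComVizinhos_spec : Claim_equal_getRatingsUsuarioComumComVizinhos := by
  intro ru rv _ _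
  unfold Spec_getRatingsUsuarioComumComVizinhos
  unfold getRatingsUsuarioComumComVizinhos getRatingsUsuarioComumComVizinhos_alt
  simp only []
  rw [fold_filter, List.filter_filter]
  have hstep : ∀ (acc : List Int) (i : Nat),
      (if ru.getD i 0 ≠ 0 then
        if (List.range rv.length).foldl (fun b v => if (rv.getD v []).getD i 0 = 0 then false else b) true
        then acc ++ [ru.getD i 0] else acc
      else acc)
      = (if ((rv.all fun row => decide (row.getD i 0 ≠ 0)) && decide (ru.getD i 0 ≠ 0)) = true
         then acc ++ [ru.getD i 0] else acc) := by
    intro acc i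
    rw [inner_flag, Bool.true_and]
    cases hx : (rv.all fun row => decide (row.getD i 0 ≠ 0)) <;>
      cases hy : decide (ru.getD i 0 ≠ 0) <;> simp_all
  calc (List.range ru.length).foldl (fun acc i =>
        if ru.getD i 0 ≠ 0 then
          if (List.range rv.length).foldl (fun b v => if (rv.getD v []).getD i 0 = 0 then false else b) true
          then acc ++ [ru.getD i 0] else acc
        else acc) []
      = (List.range ru.length).foldl (fun acc i =>
          if ((rv.all fun row => decide (row.getD i 0 ≠ 0)) && decide (ru.getD i 0 ≠ 0)) = true
          then acc ++ [ru.getD i 0] else acc) [] := by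
        exact PySem.List.foldl_congr_mem _ _ _ _ (fun acc i _ => hstep acc i)
    _ = ((List.range ru.length).filter (fun i => (rv.all fun row => decide (row.getD i 0 ≠ 0)) && decide (ru.getD i 0 ≠ 0))).map (fun i => ru.getD i 0) := by
        simpa using PySem.List.foldl_append_if
          (fun i => (rv.all fun row => decide (row.getD i 0 ≠ 0)) && decide (ru.getD i 0 ≠ 0))
          (fun i => ru.getD i 0) (List.range ru.length) []
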